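-- pv_equiv track=rewrite | github.com/DeepGym/deepgym | deepgym/src/deepgym/envs/string_manipulation/verifier.py | _reference_transform
-- ===== SOURCE A (Python) =====
-- def _reference_transform(s: str) -> str:
--     """Reference implementation for validation."""
--     # Split on space boundaries while preserving spacing structure
--     # We process each character sequence between spaces
--     result = []
--     word = []
--     for ch in s:
--         if ch == ' ':
--             if word:
--                 result.append(''.join(reversed(word)))
--                 word = []
--             result.append(' ')
--         else:
--             word.append(ch)
--     if word:
--         result.append(''.join(reversed(word)))
--     return ''.join(result)
-- ===== SOURCE B (Python) =====
-- def _reference_transform(s: str) -> str: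
--     """Reference implementation for validation."""
--     # Tokenize on single spaces (preserving empty segments), reverse each word, rejoin.
--     return ' '.join(w[::-1] for w in s.split(' '))
-- ===== Notes on version B (the rewrite author's own statement) =====
-- stated objective: idiomatic
-- what changed: Replaces the character-by-character loop with manual word/result accumulators by a split-on-single-space / reverse-each-word / join pipeline over whole words.
import Mathlib
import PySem

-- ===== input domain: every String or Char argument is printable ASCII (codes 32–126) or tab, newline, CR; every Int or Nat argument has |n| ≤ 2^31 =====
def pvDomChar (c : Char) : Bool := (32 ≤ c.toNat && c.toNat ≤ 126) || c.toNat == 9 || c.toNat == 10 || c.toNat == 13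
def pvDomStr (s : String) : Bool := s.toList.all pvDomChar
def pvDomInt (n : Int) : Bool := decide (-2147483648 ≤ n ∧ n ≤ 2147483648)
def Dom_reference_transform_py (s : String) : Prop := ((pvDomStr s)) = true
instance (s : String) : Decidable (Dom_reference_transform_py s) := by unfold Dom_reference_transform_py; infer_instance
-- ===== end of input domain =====

-- B replaces A's character-by-character loop (manual word/result accumulators) by an
-- idiomatic split(' ') / reverse-each-word / ' '.join pipeline; same O(n) cost.

-- ===== PORT A =====
-- the loop body of A's `for ch in s` (result/word accumulators; `''.join(reversed(word))` is word.reverse)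
def stepA (acc : List (List Char) × List Char) (ch : Char) : List (List Char) × List Char :=
  if ch = ' ' then
    ((if acc.2 ≠ [] then acc.1 ++ [acc.2.reverse] else acc.1) ++ [[' ']], [])
  else (acc.1, acc.2 ++ [ch])

-- A's trailing `if word: result.append(...)`
def finA (st : List (List Char) × List Char) : List (List Char) :=
  if st.2 ≠ [] then st.1 ++ [st.2.reverse] else st.1

def reference_transform_py (s : String) : String :=
  String.ofList (PySem.Chars.join [] (finA (s.toList.foldl stepA ([], []))))

-- ===== PORT B =====
-- ' '.join(w[::-1] for w in s.split(' ')): split on the literal single space, reverse each word, rejoin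
def reference_transform_py_alt (s : String) : String :=
  String.ofList (PySem.Chars.join [' '] ((PySem.Chars.splitOn s.toList [' ']).map List.reverse))

-- ===== PRECONDITION & SPEC =====
def Spec_reference_transform_py (s : String) (out : String) : Prop := out = reference_transform_py_alt s
instance (s : String) (out : String) : Decidable (Spec_reference_transform_py s out) := by unfold Spec_reference_transform_py; infer_instance

-- ===== CLAIM (what is proved, stated in full; the proofs are below) =====
def Claim_equal_reference_transform_py : Prop := ∀ (s : String), Dom_reference_transform_py s → Spec_reference_transform_py s (reference_transform_py s)

-- ===== LEMMAS AND PROOFS =====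

-- accumulator form of split-on-single-space (cur is the pending chunk, reversed)
def Sc : List Char → List Char → List (List Char)
  | [], cur => [cur.reverse]
  | c :: cs, cur => if c = ' ' then cur.reverse :: Sc cs [] else Sc cs (c :: cur)

-- the value A's loop still has to produce, given remaining input cs and pending word w
def F : List Char → List Char → List Char
  | [], w => w.reverse
  | c :: cs, w => if c = ' ' then w.reverse ++ ' ' :: F cs [] else F cs (w ++ [c])

theorem go_eq_Sc (fuel : Nat) (l cur : List Char) (acc : List (List Char))
    (h : l.length ≤ fuel) :
    PySem.Chars.splitOn.go [' '] fuel l cur acc = acc.reverse ++ Sc l cur := by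
  induction fuel generalizing l cur acc with
  | zero =>
    cases l with
    | nil => simp [PySem.Chars.splitOn.go, Sc]
    | cons c cs => simp at h
  | succ n ih =>
    cases l with
    | nil => simp [PySem.Chars.splitOn.go, Sc]
    | cons c cs =>
      by_cases hc : c = ' '
      · subst hc
        rw [PySem.Chars.splitOn.go]
        simp [List.isPrefixOf, Sc, ih _ _ _ (by simpa using Nat.le_of_succ_le_succ h)]
      · rw [PySem.Chars.splitOn.go]
        simp [List.isPrefixOf, hc, Ne.symm hc, Sc,
          ih _ _ _ (by simpa using Nat.le_of_succ_le_succ h)]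

theorem splitOn_eq_Sc (cs : List Char) : PySem.Chars.splitOn cs [' '] = Sc cs [] := by
  simpa using go_eq_Sc (cs.length + 1) cs [] [] (by omega)

theorem Sc_ne_nil (cs cur : List Char) : Sc cs cur ≠ [] := by
  induction cs generalizing cur with
  | nil => simp [Sc]
  | cons c cs ih =>
    by_cases hc : c = ' ' <;> simp [Sc, hc, ih]

theorem join_nil_flatten (l : List (List Char)) : PySem.Chars.join [] l = l.flatten := by
  induction l with
  | nil => simp [PySem.Chars.join_nil]
  | cons p rest ih =>
    cases rest with
    | nil => simp [PySem.Chars.join_singleton]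
    | cons q rest' => simp [PySem.Chars.join_cons_cons, ih]

theorem F_eq (cs : List Char) (w : List Char) :
    F cs w = PySem.Chars.join [' '] ((Sc cs w.reverse).map List.reverse) := by
  induction cs generalizing w with
  | nil => simp [F, Sc, PySem.Chars.join_singleton]
  | cons c cs ih =>
    by_cases hc : c = ' '
    · subst hc
      obtain ⟨q, rest, hq⟩ := List.exists_cons_of_ne_nil (Sc_ne_nil cs [])
      simp [F, Sc, hq, List.map_cons, PySem.Chars.join_cons_cons, ih []]
    · have h2 := ih (w ++ [c])
      simp only [List.reverse_append, List.reverse_singleton, List.singleton_append] at h2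
      simp [F, Sc, hc, h2]

theorem foldA (cs : List Char) (res : List (List Char)) (w : List Char) :
    (finA (cs.foldl stepA (res, w))).flatten = res.flatten ++ F cs w := by
  induction cs generalizing res w with
  | nil =>
    by_cases hw : w = [] <;> simp [finA, F, hw]
  | cons c cs ih =>
    by_cases hc : c = ' '
    · subst hc
      by_cases hw : w = [] <;>
        simp [List.foldl_cons, stepA, hw, F, ih]
    · simp [List.foldl_cons, stepA, hc, F, ih]

-- ===== VERDICT (by name: the statement is the Claim_ definition above) =====
theorem reference_transform_py_spec : Claim_equal_reference_transform_py := by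
  intro s _
  unfold Spec_reference_transform_py reference_transform_py reference_transform_py_alt
  rw [join_nil_flatten, foldA, splitOn_eq_Sc]
  have := F_eq s.toList []
  simp at this
  simp [this]
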